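-- pv_equiv track=rewrite | github.com/DuukPN/aoc-2023 | days/day13.py | parse_grids
-- ===== SOURCE A (Python) =====
-- def parse_grids(data):
--     grids = [[]]
--     for line in data:
--         if line:
--             grids[-1].append(line)
--         else:
--             grids.append([])
--
--     return grids
-- ===== SOURCE B (Python) =====
-- def parse_grids(data):
--     data = list(data)
--     grids = []
--     start = 0
--     for i, line in enumerate(data):
--         if not line:
--             grids.append(data[start:i])
--             start = i + 1
--     grids.append(data[start:])
--     return grids
-- ===== Notes on version B (the rewrite author's own statement) =====
-- stated objective: alternative
-- what changed: Instead of growing a list of groups by appending each line to the last group (or opening a new empty group on a blank), B scans for blank-line positions and emits each group as a slice data[start:i], appending the trailing slice at the end.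
import Mathlib
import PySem

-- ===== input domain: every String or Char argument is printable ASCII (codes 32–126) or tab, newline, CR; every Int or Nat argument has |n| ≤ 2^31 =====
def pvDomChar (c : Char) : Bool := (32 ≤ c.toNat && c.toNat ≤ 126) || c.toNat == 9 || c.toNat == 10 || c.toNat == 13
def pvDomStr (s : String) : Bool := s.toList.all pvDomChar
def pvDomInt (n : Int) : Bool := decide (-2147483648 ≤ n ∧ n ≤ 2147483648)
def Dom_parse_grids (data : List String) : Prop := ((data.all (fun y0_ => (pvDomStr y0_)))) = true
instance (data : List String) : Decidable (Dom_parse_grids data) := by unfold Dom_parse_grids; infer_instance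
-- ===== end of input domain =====

-- B splits by collecting blank-line positions in one pass and slicing each group out of the list,
-- instead of A's append-to-the-last-group accumulation; same cost, different decomposition.

-- ===== PORT A =====
-- grids[-1].append(line): append to the last group, in place
def pgAppendLast : List (List String) → String → List (List String)
  | [], _ => []
  | [g], l => [g ++ [l]]
  | g :: g' :: gs, l => g :: pgAppendLast (g' :: gs) l

-- loop body: if line: grids[-1].append(line) else: grids.append([])
def pgStep (grids : List (List String)) (line : String) : List (List String) :=
  if line ≠ "" then pgAppendLast grids line else grids ++ [[]]

def parse_grids (data : List String) : List (List String) :=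
  data.foldl pgStep [[]]

-- ===== PORT B =====
-- loop body: if not line: grids.append(data[start:i]); start = i + 1
def pgStepB (data : List String) (st : List (List String) × Int) (iv : Int × String) :
    List (List String) × Int :=
  if iv.2 = "" then (st.1 ++ [PySem.List.slice data (some st.2) (some iv.1)], iv.1 + 1) else st

def parse_grids_alt (data : List String) : List (List String) :=
  let p := (PySem.List.enumerate data 0).foldl (pgStepB data) ([], 0)
  p.1 ++ [PySem.List.slice data (some p.2) none]

-- ===== PRECONDITION & SPEC =====
def Spec_parse_grids (data : List String) (out : List (List String)) : Prop := out = parse_grids_alt data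
instance (data : List String) (out : List (List String)) : Decidable (Spec_parse_grids data out) := by unfold Spec_parse_grids; infer_instance

-- ===== CLAIM (what is proved, stated in full; the proofs are below) =====
def Claim_equal_parse_grids : Prop := ∀ (data : List String), Dom_parse_grids data → Spec_parse_grids data (parse_grids data)

-- ===== LEMMAS AND PROOFS =====

-- reference splitter: prepend to the first group
def pvConsHd (l : String) : List (List String) → List (List String)
  | [] => [[l]]
  | g :: gs => (l :: g) :: gs

def pvSplitR : List String → List (List String)
  | [] => [[]]
  | l :: ls => if l = "" then [] :: pvSplitR ls else pvConsHd l (pvSplitR ls)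

-- append a prefix onto the first group
def pvHdApp (g : List String) : List (List String) → List (List String)
  | [] => [g]
  | h :: t => (g ++ h) :: t

lemma pvSplitR_ne_nil (ls : List String) : pvSplitR ls ≠ [] := by
  cases ls with
  | nil => simp [pvSplitR]
  | cons l ls =>
      simp only [pvSplitR]
      split
      · simp
      · cases h : pvSplitR ls <;> simp [pvConsHd]

lemma pvHdApp_nil (gs : List (List String)) (h : gs ≠ []) : pvHdApp [] gs = gs := by
  cases gs with
  | nil => exact absurd rfl h
  | cons g t => simp [pvHdApp]

lemma pgAppendLast_ne_nil (gs : List (List String)) (l : String) (h : gs ≠ []) :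
    pgAppendLast gs l ≠ [] := by
  cases gs with
  | nil => exact absurd rfl h
  | cons g t => cases t <;> simp [pgAppendLast]

lemma pgAppendLast_append (gs hs : List (List String)) (l : String) (h : hs ≠ []) :
    pgAppendLast (gs ++ hs) l = gs ++ pgAppendLast hs l := by
  induction gs with
  | nil => simp
  | cons g gs ih =>
      cases hgs : gs ++ hs with
      | nil =>
          rcases List.append_eq_nil_iff.mp hgs with ⟨_, h2⟩
          exact absurd h2 h
      | cons a t =>
          simp only [List.cons_append, hgs, pgAppendLast]
          rw [← hgs, ih]

lemma pgStep_ne_nil (gs : List (List String)) (l : String) (h : gs ≠ []) :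
    pgStep gs l ≠ [] := by
  unfold pgStep
  split
  · exact pgAppendLast_ne_nil gs l h
  · simp

lemma foldl_pgStep_append (rest : List String) (gs hs : List (List String)) (h : hs ≠ []) :
    List.foldl pgStep (gs ++ hs) rest = gs ++ List.foldl pgStep hs rest := by
  induction rest generalizing hs with
  | nil => simp
  | cons r rest ih =>
      simp only [List.foldl_cons]
      have hstep : pgStep (gs ++ hs) r = gs ++ pgStep hs r := by
        unfold pgStep
        split
        · exact pgAppendLast_append gs hs r h
        · simp
      rw [hstep, ih _ (pgStep_ne_nil hs r h)]

lemma foldl_pgStep_single (ls : List String) (g : List String) :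
    List.foldl pgStep [g] ls = pvHdApp g (pvSplitR ls) := by
  induction ls generalizing g with
  | nil => simp [pvSplitR, pvHdApp]
  | cons l ls ih =>
      by_cases hl : l = ""
      · subst hl
        simp only [List.foldl_cons, pgStep, ne_eq, not_true_eq_false, if_false]
        rw [foldl_pgStep_append ls [g] [[]] (by simp), ih []]
        rw [pvHdApp_nil _ (pvSplitR_ne_nil ls)]
        simp [pvSplitR, pvHdApp]
      · simp only [List.foldl_cons, pgStep, ne_eq, hl, not_false_eq_true, if_true,
          pgAppendLast]
        rw [ih (g ++ [l])]
        simp only [pvSplitR, hl, if_false]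
        cases h : pvSplitR ls with
        | nil => exact absurd h (pvSplitR_ne_nil ls)
        | cons g' gs => simp [pvConsHd, pvHdApp]

lemma parse_grids_eq_splitR (data : List String) : parse_grids data = pvSplitR data := by
  have : ([[]] : List (List String)) = [([] : List String)] := rfl
  rw [parse_grids, this, foldl_pgStep_single, pvHdApp_nil _ (pvSplitR_ne_nil data)]

lemma foldl_pgStepB (data : List String) (n : ℕ) :
    ∀ (k st : ℕ) (acc : List (List String)), st ≤ k → data.length - k = n →
      k ≤ data.length →
      (let p := (PySem.List.enumerate (data.drop k) (k : Int)).foldl (pgStepB data)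
          (acc, (st : Int));
       p.1 ++ [PySem.List.slice data (some p.2) none])
      = acc ++ pvHdApp ((data.drop st).take (k - st)) (pvSplitR (data.drop k)) := by
  induction n with
  | zero =>
      intro k st acc hst hn hk
      have hkl : k = data.length := by omega
      subst hkl
      simp only [List.drop_length, PySem.List.enumerate_nil, List.foldl_nil,
        PySem.List.slice_from_natCast, pvSplitR, pvHdApp]
      have : (data.drop st).take (data.length - st) = data.drop st := by
        rw [← List.length_drop (l := data) (i := st), List.take_length]
      simp [this]
  | succ n ih =>
      intro k st acc hst hn hk
      have hklt : k < data.length := by omega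
      have hdrop : data.drop k = data[k] :: data.drop (k + 1) :=
        List.drop_eq_getElem_cons hklt
      rw [hdrop]
      rw [PySem.List.enumerate_cons]
      simp only [List.foldl_cons]
      by_cases hx : data[k] = ""
      · -- blank line: emit slice, advance start
        have hstep : pgStepB data (acc, (st : Int)) ((k : Int), data[k])
            = (acc ++ [PySem.List.slice data (some (st : Int)) (some (k : Int))],
               (k : Int) + 1) := by
          simp [pgStepB, hx]
        rw [hstep]
        have hcast : ((k : Int) + 1) = (((k + 1 : ℕ) : Int)) := by push_cast; ring
        rw [hcast]
        have := ih (k + 1) (k + 1)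
          (acc ++ [PySem.List.slice data (some (st : Int)) (some (k : Int))])
          le_rfl (by omega) (by omega)
        simp only at this
        rw [this]
        rw [PySem.List.slice_natCast]
        have h0 : (k + 1) - (k + 1) = 0 := by omega
        rw [h0, List.take_zero, pvHdApp_nil _ (pvSplitR_ne_nil _)]
        have hsr : pvSplitR (data[k] :: data.drop (k + 1)) = [] :: pvSplitR (data.drop (k + 1)) := by
          simp [pvSplitR, hx]
        rw [hsr]
        simp [pvHdApp, List.append_assoc]
      · -- non-blank line: state unchanged
        have hstep : pgStepB data (acc, (st : Int)) ((k : Int), data[k]) = (acc, (st : Int)) := by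
          simp [pgStepB, hx]
        rw [hstep]
        have hcast : ((k : Int) + 1) = (((k + 1 : ℕ) : Int)) := by push_cast; ring
        rw [hcast]
        have := ih (k + 1) st acc (by omega) (by omega) (by omega)
        simp only at this
        rw [this]
        have hsr : pvSplitR (data[k] :: data.drop (k + 1)) = pvConsHd data[k] (pvSplitR (data.drop (k + 1))) := by
          simp [pvSplitR, hx]
        rw [hsr]
        have htake : (data.drop st).take (k + 1 - st)
            = (data.drop st).take (k - st) ++ [data[k]] := by
          have hlt : k - st < (data.drop st).length := by simp; omega
          have hget : (data.drop st)[k - st] = data[k] := by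
            rw [List.getElem_drop]
            congr 1; omega
          have hsucc : k + 1 - st = (k - st) + 1 := by omega
          rw [hsucc, List.take_add_one, List.getElem?_eq_getElem hlt, hget]
          rfl
        rw [htake]
        cases h : pvSplitR (data.drop (k + 1)) with
        | nil => exact absurd h (pvSplitR_ne_nil _)
        | cons g' gs => simp [pvConsHd, pvHdApp, List.append_assoc]

lemma parse_grids_alt_eq_splitR (data : List String) : parse_grids_alt data = pvSplitR data := by
  have h := foldl_pgStepB data data.length 0 0 [] le_rfl (by omega) (by omega)
  simp only [List.drop_zero, Nat.sub_zero, List.take_zero, Nat.cast_zero] at h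
  rw [parse_grids_alt]
  exact h.trans (by rw [List.nil_append, pvHdApp_nil _ (pvSplitR_ne_nil data)])

-- ===== VERDICT (by name: the statement is the Claim_ definition above) =====
theorem parse_grids_spec : Claim_equal_parse_grids := by
  intro data _
  unfold Spec_parse_grids
  rw [parse_grids_eq_splitR, parse_grids_alt_eq_splitR]
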